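-- pv_equiv track=rewrite | github.com/platosha-git/Compilers | lab2/interface.py | getLongestPrefix
-- ===== SOURCE A (Python) =====
-- def getLongestPrefix(rules):
-- 		production_string_array = []
-- 		for p in rules:
-- 				s = ''
-- 				for i in range(len(p)):
-- 						s += p[i] + '|'
-- 				production_string_array.append(s)
-- 		production_string_array.sort()
--
-- 		max_prefix = ''
-- 		for i in range(len(production_string_array) - 1):
-- 				p1 = production_string_array[i]
-- 				p2 = production_string_array[i + 1]
-- 				prefix = ''
--
-- 				for j in range(min(len(p1), len(p2))):
-- 						if p1[j] == p2[j]: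
-- 								prefix += p1[j]
-- 						else:
-- 								if len(prefix) > len(max_prefix):
-- 										max_prefix = prefix
-- 								prefix = ''
-- 								break
-- 				if len(prefix) > len(max_prefix):
-- 						max_prefix = prefix
--
-- 		max_prefix_arr = max_prefix.split('|')[:-1]
--
-- 		return max_prefix_arr
-- ===== SOURCE B (Python) =====
-- def getLongestPrefix(rules):
--     # Hash-index of every prefix of every joined production (no sorting):
--     # count how many productions share each prefix, then pick the longest
--     # (lexicographically smallest on ties) prefix shared by at least two.
--     counts = {}
--     for p in rules:
--         s = ''.join(c + '|' for c in p)
--         for k in range(1, len(s) + 1):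
--             pref = s[:k]
--             counts[pref] = counts.get(pref, 0) + 1
--     best = ''
--     for pref, c in counts.items():
--         if c >= 2 and (len(pref) > len(best) or (len(pref) == len(best) and pref < best)):
--             best = pref
--     return best.split('|')[:-1]
-- ===== Notes on version B (the rewrite author's own statement) =====
-- stated objective: alternative
-- what changed: A sorts the joined production strings and scans adjacent pairs for the longest common prefix; B never sorts: it builds a dictionary counting how many productions have each prefix of each joined string and picks the longest (lexicographically smallest on ties) prefix with count >= 2.
import Mathlib
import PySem

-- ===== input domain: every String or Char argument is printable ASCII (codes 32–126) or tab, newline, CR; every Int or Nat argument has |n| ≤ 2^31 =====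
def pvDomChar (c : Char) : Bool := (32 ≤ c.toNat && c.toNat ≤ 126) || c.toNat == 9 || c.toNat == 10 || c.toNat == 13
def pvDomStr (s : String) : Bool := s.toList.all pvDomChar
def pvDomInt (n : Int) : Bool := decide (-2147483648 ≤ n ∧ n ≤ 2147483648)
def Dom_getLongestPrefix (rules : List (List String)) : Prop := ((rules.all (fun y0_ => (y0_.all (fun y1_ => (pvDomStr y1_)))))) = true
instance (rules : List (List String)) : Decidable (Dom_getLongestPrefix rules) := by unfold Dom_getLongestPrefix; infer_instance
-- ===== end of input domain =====

-- B replaces A's sort + adjacent-pair scan by a dictionary counting every prefix of every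
-- joined production and picking the longest (lexicographically smallest on ties) prefix
-- held by at least two productions (objective: alternative algorithm, no sort).

-- ===== PORT A =====
-- inner 'for j in range(min(len(p1), len(p2)))' loop with its break, as fuel recursion;
-- the ' ' default of getD is never used (j is always in range for both strings)
def gpInner (p1 p2 : String) : Nat → Nat → String → String → String × String
  | 0, _, pre, maxp => (pre, maxp)
  | fuel+1, j, pre, maxp =>
    if PySem.Str.pyGet? p1 (j : Int) = PySem.Str.pyGet? p2 (j : Int) then
      gpInner p1 p2 fuel (j+1)
        (pre ++ String.ofList [(PySem.Str.pyGet? p1 (j : Int)).getD ' ']) maxp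
    else
      ("", if PySem.Str.len pre > PySem.Str.len maxp then pre else maxp)

-- one iteration of the outer 'for i' loop body: inner loop, then the post-loop check
def gpStep (maxp p1 p2 : String) : String :=
  let r := gpInner p1 p2 (min (PySem.Str.len p1) (PySem.Str.len p2)).toNat 0 "" maxp
  if PySem.Str.len r.1 > PySem.Str.len r.2 then r.1 else r.2

def getLongestPrefix (rules : List (List String)) : List String :=
  let arr := rules.foldl (fun acc p =>
      acc ++ [(PySem.List.pyRange 0 (PySem.List.len p) 1).foldl
        (fun s i => s ++ PySem.List.pyGetD p i "" ++ "|") ""]) []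
  let arr := PySem.List.sorted arr (fun x => x)
  let maxp := (PySem.List.pyRange 0 (PySem.List.len arr - 1) 1).foldl
      (fun maxp i => gpStep maxp (PySem.List.pyGetD arr i "") (PySem.List.pyGetD arr (i+1) "")) ""
  PySem.List.slice ((PySem.Str.split? maxp "|").getD []) none (some (-1))

-- ===== PORT B =====
def gpPrefixCounts (rules : List (List String)) : PySem.Dict String Int :=
  rules.foldl (fun d p =>
    let s := PySem.Str.join "" (p.map (fun c => c ++ "|"))
    (PySem.List.pyRange 1 (PySem.Str.len s + 1) 1).foldl
      (fun d k =>
        let pref := PySem.Str.slice s none (some k)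
        d.insert pref (d.getD pref 0 + 1)) d) PySem.Dict.empty

def getLongestPrefix_alt (rules : List (List String)) : List String :=
  let counts := gpPrefixCounts rules
  let best := counts.items.foldl (fun best kv =>
    if kv.2 ≥ 2 ∧ (PySem.Str.len kv.1 > PySem.Str.len best ∨
        (PySem.Str.len kv.1 = PySem.Str.len best ∧ kv.1 < best)) then kv.1 else best) ""
  PySem.List.slice ((PySem.Str.split? best "|").getD []) none (some (-1))

-- ===== PRECONDITION & SPEC =====
def Spec_getLongestPrefix (rules : List (List String)) (out : List String) : Prop := out = getLongestPrefix_alt rules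
instance (rules : List (List String)) (out : List String) : Decidable (Spec_getLongestPrefix rules out) := by unfold Spec_getLongestPrefix; infer_instance

-- ===== CLAIM (what is proved, stated in full; the proofs are below) =====
def Claim_equal_getLongestPrefix : Prop := ∀ (rules : List (List String)), Dom_getLongestPrefix rules → Spec_getLongestPrefix rules (getLongestPrefix rules)

-- ===== LEMMAS AND PROOFS =====

-- ---- proof-level vocabulary ----

/-- longest common prefix of two character lists -/
def lcp : List Char → List Char → List Char
  | a :: as, b :: bs => if a = b then a :: lcp as bs else []
  | _, _ => []

/-- the joined production string, at specification level -/
def jstr (p : List String) : String :=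
  String.ofList (p.flatMap (fun t => t.toList ++ ['|']))

/-- 'is strictly preferable': longer, or same length and lexicographically smaller -/
def better (a b : String) : Prop :=
  b.toList.length < a.toList.length ∨ (a.toList.length = b.toList.length ∧ a < b)

/-- r is the optimum of C under `better` (or "" when C is empty) -/
def isBest (C : String → Prop) (r : String) : Prop :=
  (r = "" ∧ ∀ k, C k → False) ∨ (C r ∧ ∀ k, C k → ¬ better k r)

/-- the set both programs optimise over: nonempty prefixes shared by ≥ 2 joined productions -/
def sharedC (rules : List (List String)) (v : String) : Prop :=
  v ≠ "" ∧ 2 ≤ ((rules.map jstr).countP (fun s => decide (v.toList <+: s.toList)))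

/-- common final step: best.split('|')[:-1] -/
def gpTrim (s : String) : List String :=
  PySem.List.slice ((PySem.Str.split? s "|").getD []) none (some (-1))

/-- A's fold over the adjacent pairs of the sorted strings, at spec level -/
def amax (S : List String) : String :=
  (S.zip S.tail).foldl (fun m q =>
    if m.toList.length < (lcp q.1.toList q.2.toList).length
    then String.ofList (lcp q.1.toList q.2.toList) else m) ""

-- ---- generic order/prefix lemmas ----

theorem lcp_prefix_left : ∀ a b : List Char, lcp a b <+: a := by
  intro a
  induction a with
  | nil => intro b; cases b <;> simp [lcp]
  | cons x as ih =>
    intro b; cases b with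
    | nil => simp [lcp]
    | cons y bs =>
      by_cases h : x = y <;> simp [lcp, h]
      exact ih bs

theorem lcp_prefix_right : ∀ a b : List Char, lcp a b <+: b := by
  intro a
  induction a with
  | nil => intro b; cases b <;> simp [lcp]
  | cons x as ih =>
    intro b; cases b with
    | nil => simp [lcp]
    | cons y bs =>
      by_cases h : x = y <;> simp [lcp, h]
      subst h; exact ih bs

theorem prefix_lcp : ∀ {p a b : List Char}, p <+: a → p <+: b → p <+: lcp a b := by
  intro p
  induction p with
  | nil => intro a b _ _; simp
  | cons c p ih =>
    intro a b ha hb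
    obtain ⟨ta, rfl⟩ := ha
    obtain ⟨tb, hb⟩ := hb
    cases b with
    | nil => simp at hb
    | cons y bs =>
      simp at hb
      obtain ⟨rfl, hb⟩ := hb
      simp [lcp]
      exact ih ⟨ta, rfl⟩ ⟨tb, hb⟩


theorem append_lt_append (a : List Char) : ∀ (b s t : List Char),
    a.length = b.length → a < b → a ++ s < b ++ t := by
  induction a with
  | nil =>
    intro b s t hlen h
    have : b = [] := by cases b <;> simp_all
    subst this
    exact absurd h (List.lt_irrefl _)
  | cons x as ih =>
    intro b s t hlen h
    cases b with
    | nil => simp at hlen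
    | cons y bs =>
      rw [List.cons_lt_cons_iff] at h
      rcases h with h | ⟨rfl, h⟩
      · exact List.cons_lt_cons_iff.mpr (Or.inl h)
      · exact List.cons_lt_cons_iff.mpr (Or.inr ⟨rfl, ih bs s t (by simpa using hlen) h⟩)


/-- two same-length prefixes of lex-ordered lists compare the same way -/
theorem prefix_le_of_le {a b s t : List Char} (ha : a <+: s) (hb : b <+: t)
    (hlen : a.length = b.length) (hst : s ≤ t) : a ≤ b := by
  by_contra hab
  rw [not_le] at hab
  obtain ⟨u, rfl⟩ := ha
  obtain ⟨w, rfl⟩ := hb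
  exact absurd (append_lt_append b a w u hlen.symm hab) (not_lt.mpr hst)


/-- a common prefix of the two ends is a prefix of anything lex-between them -/
theorem prefix_between : ∀ {p s t u : List Char}, p <+: s → p <+: u → s ≤ t → t ≤ u → p <+: t := by
  intro p
  induction p with
  | nil => simp
  | cons c p ih =>
    intro s t u hs hu hst htu
    obtain ⟨s', rfl⟩ := hs
    obtain ⟨u', hu⟩ := hu
    cases u with
    | nil => simp at hu
    | cons cu u2 =>
      simp at hu
      obtain ⟨rfl, hu⟩ := hu
      cases t with
      | nil =>
        have : (c :: (p ++ s') : List Char) ≤ [] := hst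
        have h2 : ¬ ([] : List Char) < c :: (p ++ s') := not_lt.mpr this
        exact absurd (List.nil_lt_cons _ _) h2
      | cons ct t2 =>
        have h1 : ¬ (ct :: t2) < (c :: (p ++ s')) := not_lt.mpr hst
        have h2 : ¬ (c :: u2) < (ct :: t2) := not_lt.mpr htu
        rw [List.cons_lt_cons_iff] at h1 h2
        have hctc : ct = c := by
          rcases lt_trichotomy c ct with h | h | h
          · exact absurd (Or.inl h) h2
          · exact h.symm
          · exact absurd (Or.inl h) h1
        subst hctc
        have ht2 : ¬ t2 < p ++ s' := fun hh => h1 (Or.inr ⟨rfl, hh⟩)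
        have hu2 : ¬ u2 < t2 := fun hh => h2 (Or.inr ⟨rfl, hh⟩)
        have := ih (List.prefix_append p s') ⟨u', hu⟩ (not_lt.mp ht2) (not_lt.mp hu2)
        exact List.cons_prefix_cons.mpr ⟨rfl, this⟩


theorem better_irrefl (a : String) : ¬ better a a := by
  rintro (h | ⟨_, h⟩)
  · exact lt_irrefl _ h
  · exact lt_irrefl _ h

theorem better_trans {a b c : String} : better a b → better b c → better a c := by
  rintro (h1 | ⟨e1, h1⟩) (h2 | ⟨e2, h2⟩)
  · exact Or.inl (h2.trans h1)
  · exact Or.inl (by omega)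
  · exact Or.inl (by omega)
  · exact Or.inr ⟨by omega, h1.trans h2⟩

theorem better_total {a b : String} (h : a ≠ b) : better a b ∨ better b a := by
  rcases lt_trichotomy a.toList.length b.toList.length with hl | hl | hl
  · exact Or.inr (Or.inl hl)
  · rcases lt_or_gt_of_ne h with hab | hab
    · exact Or.inl (Or.inr ⟨hl, hab⟩)
    · exact Or.inr (Or.inr ⟨hl.symm, hab⟩)
  · exact Or.inl (Or.inl hl)


theorem isBest_congr {C C' : String → Prop} (h : ∀ v, C v ↔ C' v) {r : String}
    (hb : isBest C r) : isBest C' r := by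
  rcases hb with ⟨hr, hall⟩ | ⟨hc, hall⟩
  · exact Or.inl ⟨hr, fun k hk => hall k ((h k).mpr hk)⟩
  · exact Or.inr ⟨(h r).mp hc, fun k hk => hall k ((h k).mpr hk)⟩


theorem isBest_unique {C : String → Prop} {r1 r2 : String}
    (h1 : isBest C r1) (h2 : isBest C r2) : r1 = r2 := by
  rcases h1 with ⟨rfl, he1⟩ | ⟨hc1, ha1⟩
  · rcases h2 with ⟨rfl, _⟩ | ⟨hc2, _⟩
    · rfl
    · exact absurd (he1 _ hc2) (by simp)
  · rcases h2 with ⟨rfl, he2⟩ | ⟨hc2, ha2⟩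
    · exact absurd (he2 _ hc1) (by simp)
    · by_contra hne
      rcases better_total hne with h | h
      · exact ha2 _ hc1 h
      · exact ha1 _ hc2 h


-- ---- A-side lemmas ----

theorem gpInner_spec (p1 p2 : String) : ∀ (n j : Nat) (pre maxp : String),
    n + j = min p1.toList.length p2.toList.length →
    gpInner p1 p2 n j pre maxp =
      (if (lcp (p1.toList.drop j) (p2.toList.drop j)).length = n
       then (pre ++ String.ofList (lcp (p1.toList.drop j) (p2.toList.drop j)), maxp)
       else ("", if maxp.toList.length <
                  pre.toList.length + (lcp (p1.toList.drop j) (p2.toList.drop j)).length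
             then pre ++ String.ofList (lcp (p1.toList.drop j) (p2.toList.drop j)) else maxp)) := by
  intro n
  induction n with
  | zero =>
    intro j pre maxp hj
    have : p1.toList.length ≤ j ∨ p2.toList.length ≤ j := by omega
    have hnil : lcp (p1.toList.drop j) (p2.toList.drop j) = [] := by
      rcases this with h | h
      · rw [List.drop_eq_nil_of_le h]
        cases p2.toList.drop j <;> simp [lcp]
      · rw [show p2.toList.drop j = [] from List.drop_eq_nil_of_le h]
        cases p1.toList.drop j <;> simp [lcp]
    rw [hnil]
    simp [gpInner]
  | succ n ih =>
    intro j pre maxp hj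
    have hj1 : j < p1.toList.length := by omega
    have hj2 : j < p2.toList.length := by omega
    have hd1 : p1.toList.drop j = p1.toList[j] :: p1.toList.drop (j+1) :=
      List.drop_eq_getElem_cons hj1
    have hd2 : p2.toList.drop j = p2.toList[j] :: p2.toList.drop (j+1) :=
      List.drop_eq_getElem_cons hj2
    have hg1 : PySem.Str.pyGet? p1 (j : Int) = some p1.toList[j] := by
      simp [List.getElem?_eq_getElem hj1]
    have hg2 : PySem.Str.pyGet? p2 (j : Int) = some p2.toList[j] := by
      simp [List.getElem?_eq_getElem hj2]
    rw [show (n + 1 : Nat) = n.succ from rfl]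
    by_cases hc : p1.toList[j] = p2.toList[j]
    · have heq : PySem.Str.pyGet? p1 (j : Int) = PySem.Str.pyGet? p2 (j : Int) := by
        rw [hg1, hg2, hc]
      rw [gpInner, if_pos heq]
      rw [ih (j+1) _ maxp (by omega)]
      rw [hd1, hd2]
      simp only [lcp, if_pos hc, List.length_cons, hg1, Option.getD_some]
      have happ : ∀ c : List Char,
          (pre ++ String.ofList [p1.toList[j]]) ++ String.ofList c
            = pre ++ String.ofList (p1.toList[j] :: c) := by
        intro c
        apply String.toList_inj.mp
        simp
      have hlenapp : (pre ++ String.ofList [p1.toList[j]]).toList.length = pre.toList.length + 1 := by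
        simp
      rw [hlenapp]
      by_cases hL : (lcp (List.drop (j + 1) p1.toList) (List.drop (j + 1) p2.toList)).length = n
      · simp only [hL]
        rw [happ]
        simp
      · have hR : ¬ ((lcp (List.drop (j + 1) p1.toList) (List.drop (j + 1) p2.toList)).length + 1 = n.succ) := by
          omega
        rw [if_neg hL, if_neg hR]
        have h3 : pre.toList.length + 1
            + (lcp (List.drop (j + 1) p1.toList) (List.drop (j + 1) p2.toList)).length
            = pre.toList.length
              + ((lcp (List.drop (j + 1) p1.toList) (List.drop (j + 1) p2.toList)).length + 1) := by
          omega
        rw [h3, happ]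
    · have hne : ¬ (PySem.Str.pyGet? p1 (j : Int) = PySem.Str.pyGet? p2 (j : Int)) := by
        rw [hg1, hg2]; simp [hc]
      rw [gpInner, if_neg hne]
      rw [hd1, hd2]
      simp only [lcp, if_neg hc, List.length_nil]
      have hzero : ¬ ((0 : Nat) = n.succ) := by omega
      rw [if_neg hzero]
      have : (pre ++ String.ofList ([] : List Char)) = pre := by
        apply String.toList_inj.mp; simp
      rw [this]
      simp [PySem.Str.len_eq, gt_iff_lt]

theorem gpStep_spec (maxp p1 p2 : String) :
    gpStep maxp p1 p2 =
      if maxp.toList.length < (lcp p1.toList p2.toList).length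
      then String.ofList (lcp p1.toList p2.toList) else maxp := by
  unfold gpStep
  have hfuel : (min (PySem.Str.len p1) (PySem.Str.len p2)).toNat
      = min p1.toList.length p2.toList.length := by
    simp [PySem.Str.len_eq]
    omega
  rw [hfuel, gpInner_spec p1 p2 _ 0 "" maxp (by omega)]
  simp only [List.drop_zero]
  have hemp : ∀ t : String, ("" : String) ++ t = t := by
    intro t; apply String.toList_inj.mp; simp
  by_cases hL : (lcp p1.toList p2.toList).length = min p1.toList.length p2.toList.length
  · rw [if_pos hL]
    simp only [hemp]
    simp [PySem.Str.len_eq, gt_iff_lt]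
  · rw [if_neg hL]
    simp only [hemp, String.toList_empty, List.length_nil]
    have h0 : ¬ (PySem.Str.len ("" : String) > PySem.Str.len (if maxp.toList.length < 0 + (lcp p1.toList p2.toList).length then String.ofList (lcp p1.toList p2.toList) else maxp)) := by
      rw [PySem.Str.len_eq, PySem.Str.len_eq]
      simp
    rw [if_neg h0]
    simp

theorem foldl_range_adj' {α β : Type} (d : α) (g : β → α → α → β) :
    ∀ (arr : List α) (init : β),
    (List.range (arr.length - 1)).foldl
        (fun m k => g m (arr.getD k d) (arr.getD (k+1) d)) init
      = (arr.zip arr.tail).foldl (fun m p => g m p.1 p.2) init := by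
  intro arr
  induction arr with
  | nil => intro init; simp
  | cons a t ih =>
    intro init
    cases t with
    | nil => simp
    | cons b t2 =>
      simp only [List.length_cons, Nat.add_sub_cancel, List.range_succ_eq_map,
        List.foldl_cons, List.foldl_map, List.tail_cons, List.zip_cons_cons]
      have : ∀ (k : Nat), (a :: b :: t2).getD (k+1) d = (b :: t2).getD k d := by
        intro k; simp
      simp only [List.getD_cons_zero, List.getD_cons_succ]
      have := ih (g init a b)
      simp only [List.length_cons, Nat.add_sub_cancel, List.tail_cons] at this
      exact this

theorem A_join_aux : ∀ (p : List String) (c : String),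
    p.foldl (fun s t => s ++ t ++ "|") c
      = c ++ String.ofList (p.flatMap (fun t => t.toList ++ ['|'])) := by
  intro p
  induction p with
  | nil => intro c; apply String.toList_inj.mp; simp
  | cons x p ih =>
    intro c
    simp only [List.foldl_cons, List.flatMap_cons]
    rw [ih]
    apply String.toList_inj.mp
    simp

theorem A_join (p : List String) :
    (PySem.List.pyRange 0 (PySem.List.len p) 1).foldl
        (fun s i => s ++ PySem.List.pyGetD p i "" ++ "|") "" = jstr p := by
  rw [PySem.List.foldl_pyRange_zero_pyGetD p "" (fun s t => s ++ t ++ "|") ""]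
  rw [A_join_aux]
  apply String.toList_inj.mp
  simp [jstr]

theorem intercalate_nil_flatten (l : List (List Char)) : List.intercalate ([]:List Char) l = l.flatten := by
  induction l with
  | nil => simp [List.intercalate]
  | cons x l ih =>
    cases l with
    | nil => simp [List.intercalate]
    | cons y t =>
      simp only [List.intercalate] at *
      rw [show List.intersperse ([]:List Char) (x :: y :: t) = x :: [] :: List.intersperse [] (y :: t) from rfl]
      rw [List.flatten_cons, List.flatten_cons, ih]
      simp

theorem B_join (p : List String) :
    PySem.Str.join "" (p.map (fun c => c ++ "|")) = jstr p := by
  apply String.toList_inj.mp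
  rw [PySem.Str.toList_join]
  simp only [PySem.Chars.join, jstr, String.toList_ofList, List.map_map, String.toList_empty]
  rw [intercalate_nil_flatten]
  rw [List.flatten_eq_flatMap, List.flatMap_map]
  refine List.flatMap_congr ?_
  intro t _
  simp

theorem foldl_pyrange_adj (arr : List String) (g : String → String → String → String) (init : String) :
    (PySem.List.pyRange 0 (PySem.List.len arr - 1) 1).foldl
        (fun m i => g m (PySem.List.pyGetD arr i "") (PySem.List.pyGetD arr (i+1) "")) init
      = (arr.zip arr.tail).foldl (fun m p => g m p.1 p.2) init := by
  cases arr with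
  | nil =>
    rw [show PySem.List.len ([] : List String) - 1 = -1 by simp [PySem.List.len_eq]]
    rw [PySem.List.pyRange_one_eq_nil (by omega)]
    simp
  | cons a t =>
    rw [show PySem.List.len (a :: t) - 1 = ((a :: t).length - 1 : Nat) by
      simp [PySem.List.len_eq]]
    rw [PySem.List.pyRange_one]
    have harg : ((((a :: t).length - 1 : Nat) : Int) - 0).toNat = (a :: t).length - 1 := by omega
    rw [harg, List.foldl_map]
    have hbody : (fun (m : String) (k : Nat) =>
        g m (PySem.List.pyGetD (a :: t) (0 + (k : Int)) "") (PySem.List.pyGetD (a :: t) (0 + (k : Int) + 1) ""))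
        = (fun m k => g m ((a :: t).getD k "") ((a :: t).getD (k+1) "")) := by
      funext m k
      have h1 : (0 + (k : Int)) = ((k : Nat) : Int) := by omega
      have h2 : ((k : Int) + 1) = (((k + 1 : Nat)) : Int) := by push_cast; omega
      rw [h1, h2, PySem.List.pyGetD_natCast, PySem.List.pyGetD_natCast]
    rw [hbody, foldl_range_adj']

theorem A_outer (arr : List String) :
    (PySem.List.pyRange 0 (PySem.List.len arr - 1) 1).foldl
        (fun maxp i => gpStep maxp (PySem.List.pyGetD arr i "") (PySem.List.pyGetD arr (i+1) "")) ""
      = amax arr := by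
  rw [foldl_pyrange_adj]
  unfold amax
  rw [show (fun (m : String) (q : String × String) => gpStep m q.1 q.2)
      = (fun (m : String) (q : String × String) =>
          if m.toList.length < (lcp q.1.toList q.2.toList).length
          then String.ofList (lcp q.1.toList q.2.toList) else m) from
    funext fun m => funext fun q => gpStep_spec m q.1 q.2]

theorem A_eq (rules : List (List String)) :
    getLongestPrefix rules
      = gpTrim (amax (PySem.List.sorted (rules.map jstr) (fun x => x))) := by
  simp only [getLongestPrefix]
  rw [PySem.List.foldl_append_singleton_eq_map, List.nil_append]
  rw [show rules.map (fun p => (PySem.List.pyRange 0 (PySem.List.len p) 1).foldl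
        (fun s i => s ++ PySem.List.pyGetD p i "" ++ "|") "") = rules.map jstr from
    List.map_congr_left (fun p _ => A_join p)]
  rw [A_outer]
  rfl

/-- first-max characterisation of A's fold -/
theorem amax_cases (pairs : List (String × String)) :
    ∀ (init : String),
    (pairs.foldl (fun m q =>
        if m.toList.length < (lcp q.1.toList q.2.toList).length
        then String.ofList (lcp q.1.toList q.2.toList) else m) init = init ∧
        ∀ q ∈ pairs, (lcp q.1.toList q.2.toList).length ≤ init.toList.length) ∨
      (∃ l1 p l2, pairs = l1 ++ p :: l2 ∧
        pairs.foldl (fun m q =>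
          if m.toList.length < (lcp q.1.toList q.2.toList).length
          then String.ofList (lcp q.1.toList q.2.toList) else m) init
          = String.ofList (lcp p.1.toList p.2.toList) ∧
        init.toList.length < (lcp p.1.toList p.2.toList).length ∧
        (∀ q ∈ l1, (lcp q.1.toList q.2.toList).length < (lcp p.1.toList p.2.toList).length) ∧
        (∀ q ∈ l2, (lcp q.1.toList q.2.toList).length ≤ (lcp p.1.toList p.2.toList).length)) := by
  induction pairs with
  | nil => intro init; exact Or.inl ⟨rfl, by simp⟩
  | cons x xs ih =>
    intro init
    simp only [List.foldl_cons]
    by_cases hx : init.toList.length < (lcp x.1.toList x.2.toList).length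
    · rw [if_pos hx]
      rcases ih (String.ofList (lcp x.1.toList x.2.toList)) with ⟨heq, hall⟩ | ⟨l1, p, l2, rfl, heq, hgt, h1, h2⟩
      · refine Or.inr ⟨[], x, xs, rfl, heq, hx, by simp, by simpa using hall⟩
      · refine Or.inr ⟨x :: l1, p, l2, rfl, heq, ?_, ?_, h2⟩
        · simp at hgt; omega
        · intro q hq
          rcases List.mem_cons.mp hq with rfl | hq
          · simp at hgt; omega
          · exact h1 q hq
    · rw [if_neg hx]
      rcases ih init with ⟨heq, hall⟩ | ⟨l1, p, l2, rfl, heq, hgt, h1, h2⟩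
      · refine Or.inl ⟨heq, ?_⟩
        intro q hq
        rcases List.mem_cons.mp hq with rfl | hq
        · omega
        · exact hall q hq
      · refine Or.inr ⟨x :: l1, p, l2, rfl, heq, hgt, ?_, h2⟩
        intro q hq
        rcases List.mem_cons.mp hq with rfl | hq
        · omega
        · exact h1 q hq


theorem zip_tail_pairwise {S : List String} (hS : S.Pairwise (· ≤ ·)) :
    (S.zip S.tail).Pairwise (fun p q => p.2 ≤ q.1) := by
  induction S with
  | nil => simp
  | cons a t ih =>
    cases t with
    | nil => simp
    | cons b t2 =>
      simp only [List.tail_cons, List.zip_cons_cons]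
      rw [List.pairwise_cons]
      refine ⟨?_, ih (List.pairwise_cons.mp hS).2⟩
      intro q hq
      obtain ⟨q1, q2⟩ := q
      have hm : q1 ∈ b :: t2 := (List.of_mem_zip hq).1
      rcases List.mem_cons.mp hm with he | hm2
      · exact le_of_eq he.symm
      · exact (List.pairwise_cons.mp (List.pairwise_cons.mp hS).2).1 _ hm2


theorem zip_tail_sub {S : List String} :
    ∀ q ∈ S.zip S.tail, ∃ u w, S = u ++ q.1 :: q.2 :: w := by
  induction S with
  | nil => simp
  | cons a t ih =>
    cases t with
    | nil => simp
    | cons b t2 =>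
      intro q hq
      simp only [List.tail_cons, List.zip_cons_cons] at hq
      rcases List.mem_cons.mp hq with rfl | hq
      · exact ⟨[], t2, rfl⟩
      · obtain ⟨u, w, hw⟩ := ih q hq
        exact ⟨a :: u, w, by simp [hw]⟩


theorem adj_mem_countP {S : List String} {q : String × String}
    (hsub : ∃ u w, S = u ++ q.1 :: q.2 :: w)
    {v : String} (h1 : v.toList <+: q.1.toList) (h2 : v.toList <+: q.2.toList) :
    2 ≤ S.countP (fun s => decide (v.toList <+: s.toList)) := by
  obtain ⟨u, w, rfl⟩ := hsub
  simp [List.countP_append, h1, h2]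
  omega


theorem shared_to_adjacent {S : List String} (hS : S.Pairwise (· ≤ ·)) {v : String}
    (h2 : 2 ≤ S.countP (fun s => decide (v.toList <+: s.toList))) :
    ∃ q ∈ S.zip S.tail, v.toList <+: lcp q.1.toList q.2.toList := by
  induction S with
  | nil => simp at h2
  | cons a t ih =>
    rw [List.countP_cons] at h2
    by_cases ha : v.toList <+: a.toList
    · -- need one more in t
      have ht : 0 < t.countP (fun s => decide (v.toList <+: s.toList)) := by
        rw [if_pos (by simpa using ha)] at h2; omega
      obtain ⟨y, hy, hpy⟩ := List.countP_pos_iff.mp ht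
      simp at hpy
      cases t with
      | nil => simp at hy
      | cons b t2 =>
        -- a ≤ b ≤ y, v prefix of a and y ⇒ v prefix of b
        have hab : a ≤ b := (List.pairwise_cons.mp hS).1 b List.mem_cons_self
        have hby : b ≤ y := by
          rcases List.mem_cons.mp hy with rfl | hm
          · exact le_refl _
          · exact (List.pairwise_cons.mp (List.pairwise_cons.mp hS).2).1 _ hm
        have hvb : v.toList <+: b.toList :=
          prefix_between ha hpy (String.le_iff_toList_le.mp hab) (String.le_iff_toList_le.mp hby)
        exact ⟨(a, b), by simp, prefix_lcp ha hvb⟩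
    · have ht : 2 ≤ t.countP (fun s => decide (v.toList <+: s.toList)) := by
        rw [if_neg (by simpa using ha)] at h2; omega
      obtain ⟨q, hq, hpref⟩ := ih (List.pairwise_cons.mp hS).2 ht
      cases t with
      | nil => simp at hq
      | cons b t2 =>
        exact ⟨q, by simp only [List.tail_cons, List.zip_cons_cons]; exact List.mem_cons_of_mem _ hq, hpref⟩


theorem amax_isBest (rules : List (List String)) :
    isBest (sharedC rules) (amax (PySem.List.sorted (rules.map jstr) (fun x => x))) := by
  have hS : (PySem.List.sorted (rules.map jstr) (fun x => x)).Pairwise (· ≤ ·) :=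
    PySem.List.sorted_pairwise _ _
  have hperm : (PySem.List.sorted (rules.map jstr) (fun x => x)).Perm (rules.map jstr) :=
    PySem.List.sorted_perm _ _ _
  set S := PySem.List.sorted (rules.map jstr) (fun x => x) with hSdef
  have hcnt : ∀ v : String,
      (rules.map jstr).countP (fun s => decide (v.toList <+: s.toList))
        = S.countP (fun s => decide (v.toList <+: s.toList)) :=
    fun v => (hperm.countP_eq _).symm
  have hC : ∀ v, sharedC rules v ↔
      (v ≠ "" ∧ 2 ≤ S.countP (fun s => decide (v.toList <+: s.toList))) := by
    intro v; unfold sharedC; rw [hcnt]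
  unfold amax
  rcases amax_cases (S.zip S.tail) "" with ⟨heq, hall⟩ | ⟨l1, p, l2, hsplit, heq, hgt, h1, h2⟩
  · rw [heq]
    refine Or.inl ⟨rfl, ?_⟩
    intro k hk
    obtain ⟨hkne, hk2⟩ := (hC k).mp hk
    obtain ⟨q, hq, hpref⟩ := shared_to_adjacent hS hk2
    have h0 : (lcp q.1.toList q.2.toList).length ≤ 0 := by
      simpa using hall q hq
    have : k.toList = [] :=
      List.eq_nil_of_length_eq_zero (Nat.le_zero.mp (le_trans hpref.length_le h0))
    exact hkne (String.toList_inj.mp (by rw [this, String.toList_empty]))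
  · rw [heq]
    set c := lcp p.1.toList p.2.toList with hcdef
    have hlen : (String.ofList c).toList = c := String.toList_ofList
    have hgt0 : 0 < c.length := by simpa using hgt
    have hpmem : p ∈ S.zip S.tail := by rw [hsplit]; exact List.mem_append_right _ List.mem_cons_self
    have hCM : sharedC rules (String.ofList c) := by
      rw [hC]
      constructor
      · intro hh
        have hnil := congrArg String.toList hh
        rw [hlen, String.toList_empty] at hnil
        rw [hnil] at hgt0
        exact absurd hgt0 (by simp)
      · refine adj_mem_countP (zip_tail_sub p hpmem) ?_ ?_
        · rw [hlen]; exact lcp_prefix_left _ _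
        · rw [hlen]; exact lcp_prefix_right _ _
    refine Or.inr ⟨hCM, ?_⟩
    intro k hk
    obtain ⟨hkne, hk2⟩ := (hC k).mp hk
    obtain ⟨q, hq, hpref⟩ := shared_to_adjacent hS hk2
    have hkle : k.toList.length ≤ (lcp q.1.toList q.2.toList).length := hpref.length_le
    have hqle : (lcp q.1.toList q.2.toList).length ≤ c.length := by
      rw [hsplit] at hq
      rcases List.mem_append.mp hq with hq | hq
      · exact le_of_lt (h1 q hq)
      · rcases List.mem_cons.mp hq with rfl | hq
        · exact le_refl _
        · exact h2 q hq
    rintro (hbet | ⟨hbl, hblt⟩)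
    · exact absurd (by rw [hlen] at hbet; exact hbet) (not_lt.mpr (le_trans hkle hqle))
    · rw [hlen] at hbl
      have hkcq : k.toList = lcp q.1.toList q.2.toList :=
        hpref.eq_of_length (le_antisymm hkle (by rw [hbl]; exact hqle))
      rw [hsplit] at hq
      rcases List.mem_append.mp hq with hq | hq
      · have hlt := h1 q hq
        have : k.toList.length < c.length := lt_of_le_of_lt hkle hlt
        rw [hbl] at this
        exact lt_irrefl _ this
      · rcases List.mem_cons.mp hq with rfl | hq
        · have hkM : k = String.ofList c := String.toList_inj.mp (by rw [hkcq, hlen])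
          rw [hkM] at hblt
          exact lt_irrefl _ hblt
        · have hpw := zip_tail_pairwise hS
          rw [hsplit] at hpw
          have hpq : p.2 ≤ q.1 := by
            have hsub : (p :: l2).Sublist (l1 ++ p :: l2) := List.sublist_append_right _ _
            exact (List.pairwise_cons.mp (hpw.sublist hsub)).1 q hq
          have hMk : (String.ofList c) ≤ k := by
            rw [String.le_iff_toList_le, hlen]
            refine prefix_le_of_le (lcp_prefix_right _ _) ?_ ?_ (String.le_iff_toList_le.mp hpq)
            · rw [hkcq]; exact lcp_prefix_left _ _
            · exact hbl.symm
          exact absurd hblt (not_lt.mpr hMk)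

-- ---- B-side lemmas ----

def prefsOf (s : String) : List String :=
  (PySem.List.pyRange 1 (PySem.Str.len s + 1) 1).map
    (fun k => PySem.Str.slice s none (some k))

def allPrefs (rules : List (List String)) : List String :=
  rules.flatMap (fun p => prefsOf (jstr p))

theorem prefsOf_eq (s : String) :
    prefsOf s = (List.range s.toList.length).map
      (fun k => PySem.Str.slice s none (some ((k + 1 : Nat) : Int))) := by
  unfold prefsOf
  rw [PySem.List.pyRange_one]
  rw [show ((PySem.Str.len s + 1 - 1)).toNat = s.toList.length by rw [PySem.Str.len_eq]; omega]
  rw [List.map_map]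
  refine List.map_congr_left ?_
  intro k _
  simp only [Function.comp]
  have h1 : (1 + (k : Int)) = (((k + 1 : Nat)) : Int) := by push_cast; ring
  rw [h1]

theorem slice_toList (s : String) (k : Nat) :
    (PySem.Str.slice s none (some ((k : Int)))).toList = s.toList.take k := by
  rw [PySem.Str.toList_slice, PySem.Chars.slice_eq_listSlice,
    PySem.List.slice_to s.toList (Int.natCast_nonneg k)]
  simp

theorem mem_prefsOf (s v : String) :
    v ∈ prefsOf s ↔ (v ≠ "" ∧ v.toList <+: s.toList) := by
  rw [prefsOf_eq, List.mem_map]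
  constructor
  · rintro ⟨k, hk, rfl⟩
    rw [List.mem_range] at hk
    constructor
    · intro hh
      have := congrArg String.toList hh
      rw [slice_toList, String.toList_empty] at this
      have hlen := congrArg List.length this
      rw [List.length_take] at hlen
      rw [List.length_nil, Nat.min_eq_zero_iff] at hlen
      omega
    · rw [slice_toList]; exact List.take_prefix _ _
  · rintro ⟨hne, hpref⟩
    have hvlen : 0 < v.toList.length := by
      rcases Nat.eq_zero_or_pos v.toList.length with h | h
      · exact absurd (String.toList_inj.mp (by rw [List.eq_nil_of_length_eq_zero h, String.toList_empty])) hne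
      · exact h
    refine ⟨v.toList.length - 1, ?_, ?_⟩
    · rw [List.mem_range]
      have := hpref.length_le
      omega
    · apply String.toList_inj.mp
      rw [slice_toList]
      rw [show v.toList.length - 1 + 1 = v.toList.length by omega]
      exact (List.prefix_iff_eq_take.mp hpref).symm

theorem nodup_prefsOf (s : String) : (prefsOf s).Nodup := by
  rw [prefsOf_eq]
  refine List.Nodup.map_on ?_ (List.nodup_range)
  intro k1 h1 k2 h2 heq
  rw [List.mem_range] at h1 h2
  have := congrArg (fun t : String => t.toList.length) heq
  simp only [slice_toList, List.length_take] at this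
  omega

theorem count_prefsOf (s v : String) :
    (prefsOf s).count v
      = if v ≠ "" ∧ v.toList <+: s.toList then 1 else 0 := by
  by_cases h : v ≠ "" ∧ v.toList <+: s.toList
  · rw [if_pos h]
    exact List.count_eq_one_of_mem (nodup_prefsOf s) ((mem_prefsOf s v).mpr h)
  · rw [if_neg h]
    exact List.count_eq_zero.mpr (fun hm => h ((mem_prefsOf s v).mp hm))

theorem count_allPrefs (rules : List (List String)) (v : String) :
    (allPrefs rules).count v
      = (rules.map jstr).countP (fun s => decide (v ≠ "" ∧ v.toList <+: s.toList)) := by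
  induction rules with
  | nil => simp [allPrefs]
  | cons p rules ih =>
    simp only [allPrefs, List.flatMap_cons, List.count_append, List.map_cons, List.countP_cons]
    rw [show (List.flatMap (fun p => prefsOf (jstr p)) rules).count v = (allPrefs rules).count v from rfl]
    rw [ih, count_prefsOf]
    by_cases h : v ≠ "" ∧ v.toList <+: (jstr p).toList
    · rw [if_pos h, if_pos (by simpa using h)]; omega
    · rw [if_neg h, if_neg (by simpa using h)]; omega

theorem inner_fold_eq (s : String) (d : PySem.Dict String Int) :
    (PySem.List.pyRange 1 (PySem.Str.len s + 1) 1).foldl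
      (fun d k =>
        let pref := PySem.Str.slice s none (some k)
        d.insert pref (d.getD pref 0 + 1)) d
    = (prefsOf s).foldl (fun d x => d.insert x (d.getD x 0 + 1)) d := by
  unfold prefsOf
  rw [List.foldl_map]

theorem step_eq (p : List String) (d : PySem.Dict String Int) :
    (fun d p =>
      let s := PySem.Str.join "" (List.map (fun c => c ++ "|") p)
      (PySem.List.pyRange 1 (PySem.Str.len s + 1) 1).foldl
        (fun d k =>
          let pref := PySem.Str.slice s none (some k)
          d.insert pref (d.getD pref 0 + 1)) d) d p
    = (prefsOf (jstr p)).foldl (fun d x => d.insert x (d.getD x 0 + 1)) d := by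
  simp only [B_join]
  rw [inner_fold_eq]

theorem gpPrefixCounts_eq (rules : List (List String)) :
    gpPrefixCounts rules
      = rules.foldl (fun d p => (prefsOf (jstr p)).foldl
          (fun d x => d.insert x (d.getD x 0 + 1)) d) PySem.Dict.empty := by
  unfold gpPrefixCounts
  congr 1
  funext d p
  exact step_eq p d

theorem getD_aux : ∀ (rules : List (List String)) (d : PySem.Dict String Int) (v : String),
    (rules.foldl (fun d p => (prefsOf (jstr p)).foldl
        (fun d x => d.insert x (d.getD x 0 + 1)) d) d).getD v 0
      = d.getD v 0 + ((allPrefs rules).count v : Int) := by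
  intro rules
  induction rules with
  | nil => intro d v; simp [allPrefs]
  | cons p rules ih =>
    intro d v
    simp only [List.foldl_cons]
    rw [ih, PySem.Dict.getD_foldl_insert_add_one]
    simp only [allPrefs, List.flatMap_cons, List.count_append]
    push_cast
    ring

theorem gpPrefixCounts_getD (rules : List (List String)) (v : String) :
    (gpPrefixCounts rules).getD v 0 = ((allPrefs rules).count v : Int) := by
  rw [gpPrefixCounts_eq, getD_aux]
  simp

theorem nodup_aux : ∀ (rules : List (List String)) (d : PySem.Dict String Int),
    d.keys.Nodup →
    (rules.foldl (fun d p => (prefsOf (jstr p)).foldl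
        (fun d x => d.insert x (d.getD x 0 + 1)) d) d).keys.Nodup := by
  intro rules
  induction rules with
  | nil => intro d h; exact h
  | cons p rules ih =>
    intro d h
    simp only [List.foldl_cons]
    exact ih _ (PySem.Dict.nodup_keys_foldl_insert _ _ _ h)

theorem gpPrefixCounts_nodup (rules : List (List String)) :
    (gpPrefixCounts rules).keys.Nodup := by
  rw [gpPrefixCounts_eq]
  exact nodup_aux rules _ (by simp [PySem.Dict.keys_empty])

theorem keys_aux : ∀ (rules : List (List String)) (d : PySem.Dict String Int) (v : String),
    v ∈ (rules.foldl (fun d p => (prefsOf (jstr p)).foldl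
        (fun d x => d.insert x (d.getD x 0 + 1)) d) d).keys
      ↔ (v ∈ d.keys ∨ v ∈ allPrefs rules) := by
  intro rules
  induction rules with
  | nil => intro d v; simp [allPrefs]
  | cons p rules ih =>
    intro d v
    simp only [List.foldl_cons]
    rw [ih, PySem.Dict.keys_foldl_insert]
    rw [PySem.Set.mem_update]
    simp only [allPrefs, List.flatMap_cons, List.mem_append]
    tauto

theorem gpPrefixCounts_keys_mem (rules : List (List String)) (v : String) :
    v ∈ (gpPrefixCounts rules).keys ↔ v ∈ allPrefs rules := by
  rw [gpPrefixCounts_eq, keys_aux]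
  simp [PySem.Dict.keys_empty]

theorem foldBest (Q : String → Prop) (f : String → String → String)
    (hf : ∀ b k, (Q k ∧ better k b ∧ f b k = k) ∨ (¬ (Q k ∧ better k b) ∧ f b k = b)) :
    ∀ (L : List String) (b : String) (C0 : String → Prop),
    isBest C0 b → (∀ k ∈ L, Q k → k ≠ "") →
    isBest (fun v => C0 v ∨ (Q v ∧ v ∈ L)) (L.foldl f b) := by
  intro L
  induction L with
  | nil =>
    intro b C0 hb _
    simp only [List.foldl_nil]
    rcases hb with ⟨rfl, he⟩ | ⟨hc, ha⟩
    · exact Or.inl ⟨rfl, by rintro k (hk | ⟨_, hk⟩); exacts [he k hk, (List.not_mem_nil hk).elim]⟩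
    · exact Or.inr ⟨Or.inl hc, by rintro k (hk | ⟨_, hk⟩); exacts [ha k hk, (List.not_mem_nil hk).elim]⟩
  | cons x L ih =>
    intro b C0 hb hne
    simp only [List.foldl_cons]
    have hC : ∀ v, (C0 v ∨ (Q v ∧ v = x)) ∨ (Q v ∧ v ∈ L) ↔ C0 v ∨ (Q v ∧ v ∈ x :: L) := by
      intro v
      constructor
      · rintro ((h | ⟨hq, rfl⟩) | ⟨hq, hm⟩)
        · exact Or.inl h
        · exact Or.inr ⟨hq, List.mem_cons_self⟩
        · exact Or.inr ⟨hq, List.mem_cons_of_mem _ hm⟩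
      · rintro (h | ⟨hq, hm⟩)
        · exact Or.inl (Or.inl h)
        · rcases List.mem_cons.mp hm with rfl | hm
          · exact Or.inl (Or.inr ⟨hq, rfl⟩)
          · exact Or.inr ⟨hq, hm⟩
    have step : isBest (fun v => C0 v ∨ (Q v ∧ v = x)) (f b x) := by
      rcases hf b x with ⟨hq, hbet, hfx⟩ | ⟨hx, hfx⟩ <;> rw [hfx]
      · refine Or.inr ⟨Or.inr ⟨hq, rfl⟩, ?_⟩
        rintro k (hk | ⟨_, rfl⟩)
        · rcases hb with ⟨rfl, he⟩ | ⟨_, ha⟩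
          · exact (he k hk).elim
          · exact fun hkx => ha k hk (better_trans hkx hbet)
        · exact better_irrefl _
      · rcases hb with ⟨rfl, he⟩ | ⟨hc, ha⟩
        · refine Or.inl ⟨rfl, ?_⟩
          rintro k (hk | ⟨hq, rfl⟩)
          · exact he k hk
          · have hknn : k ≠ "" := hne k List.mem_cons_self hq
            have hkb : better k "" := by
              left
              have hnil : k.toList ≠ [] := fun hh => hknn (by
                have := congrArg String.ofList hh
                simpa using this)
              simpa using List.length_pos_of_ne_nil hnil
            exact (hx ⟨hq, hkb⟩).elim
        · refine Or.inr ⟨Or.inl hc, ?_⟩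
          rintro k (hk | ⟨hq, rfl⟩)
          · exact ha k hk
          · exact fun hbet => hx ⟨hq, hbet⟩
    have hres := ih _ _ step (fun k hk => hne k (List.mem_cons_of_mem _ hk))
    rcases hres with ⟨hr, he⟩ | ⟨hc, ha⟩
    · exact Or.inl ⟨hr, fun k hk => he k ((hC k).mpr hk)⟩
    · exact Or.inr ⟨(hC _).mp hc, fun k hk => ha k ((hC k).mpr hk)⟩


theorem count_shared (rules : List (List String)) (v : String) (hne : v ≠ "") :
    (allPrefs rules).count v
      = (rules.map jstr).countP (fun s => decide (v.toList <+: s.toList)) := by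
  rw [count_allPrefs]
  refine List.countP_congr ?_
  intro s _
  simp [hne]

theorem B_isBest (rules : List (List String)) :
    ∃ best, getLongestPrefix_alt rules = gpTrim best ∧ isBest (sharedC rules) best := by
  refine ⟨(gpPrefixCounts rules).items.foldl (fun best kv =>
      if kv.2 ≥ 2 ∧ (PySem.Str.len kv.1 > PySem.Str.len best ∨
        (PySem.Str.len kv.1 = PySem.Str.len best ∧ kv.1 < best)) then kv.1 else best) "",
    by simp only [getLongestPrefix_alt]; rfl, ?_⟩
  rw [PySem.Dict.items_eq_map_keys (gpPrefixCounts rules) (gpPrefixCounts_nodup rules) 0,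
    List.foldl_map]
  have hres := foldBest (fun k => 2 ≤ (allPrefs rules).count k)
    (fun best k =>
      if (gpPrefixCounts rules).getD k 0 ≥ 2 ∧ (PySem.Str.len k > PySem.Str.len best ∨
        (PySem.Str.len k = PySem.Str.len best ∧ k < best)) then k else best)
    ?_ (gpPrefixCounts rules).keys "" (fun _ => False) (Or.inl ⟨rfl, fun _ h => h⟩) ?_
  · refine isBest_congr ?_ hres
    intro v
    dsimp only
    constructor
    · rintro (h | ⟨hQ, hmem⟩)
      · exact h.elim
      · have hvne : v ≠ "" := by
          rintro rfl
          rw [count_allPrefs] at hQ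
          simp at hQ
        exact ⟨hvne, by rw [← count_shared rules v hvne]; exact hQ⟩
    · rintro ⟨hvne, hcnt⟩
      refine Or.inr ⟨by rw [count_shared rules v hvne]; exact hcnt, ?_⟩
      rw [gpPrefixCounts_keys_mem]
      rw [← List.count_pos_iff]
      have := count_shared rules v hvne
      omega
  · -- the step function is a conditional update by (Q k ∧ better k b)
    intro b k
    by_cases hc : (gpPrefixCounts rules).getD k 0 ≥ 2 ∧ (PySem.Str.len k > PySem.Str.len b ∨
        (PySem.Str.len k = PySem.Str.len b ∧ k < b))
    · refine Or.inl ⟨?_, ?_, if_pos hc⟩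
      · have := hc.1
        rw [gpPrefixCounts_getD] at this
        exact_mod_cast this
      · rcases hc.2 with h | ⟨h1, h2⟩
        · left
          rw [PySem.Str.len_eq, PySem.Str.len_eq] at h
          exact_mod_cast h
        · right
          rw [PySem.Str.len_eq, PySem.Str.len_eq] at h1
          exact ⟨by exact_mod_cast h1, h2⟩
    · refine Or.inr ⟨?_, if_neg hc⟩
      rintro ⟨hQ, hbet⟩
      apply hc
      constructor
      · rw [gpPrefixCounts_getD]
        exact_mod_cast hQ
      · rcases hbet with h | ⟨h1, h2⟩
        · left
          rw [PySem.Str.len_eq, PySem.Str.len_eq]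
          exact_mod_cast h
        · right
          rw [PySem.Str.len_eq, PySem.Str.len_eq]
          exact ⟨by exact_mod_cast h1, h2⟩
  · -- qualifying keys are nonempty strings
    intro k _ hQ
    rintro rfl
    rw [count_allPrefs] at hQ
    simp at hQ

-- ===== VERDICT (by name: the statement is the Claim_ definition above) =====
theorem getLongestPrefix_spec : Claim_equal_getLongestPrefix := by
  intro rules _
  unfold Spec_getLongestPrefix
  obtain ⟨best, hB, hbest⟩ := B_isBest rules
  rw [A_eq, hB, isBest_unique (amax_isBest rules) hbest]
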